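-- pv_equiv track=rewrite | github.com/pypi-data/pypi-mirror-377 | packages/ia-agent-dotnet/ia_agent_dotnet-0.10.0-py3-none-any.whl/monitoring/quality_analyzer.py | _check_consistent_indentation
-- ===== SOURCE A (Python) =====
-- def _check_consistent_indentation(code: str) -> bool:
--     """Verificar indentación consistente"""
--     lines = [line for line in code.split('\n') if line.strip()]
--
--     if not lines:
--         return True
--
--     # Verificar que todas las líneas usen la misma indentación
--     indentations = []
--     for line in lines:
--         if line.strip():
--             indent = len(line) - len(line.lstrip())
--             indentations.append(indent)
--
--     # Verificar consistencia
--     if not indentations: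
--         return True
--
--     # Debe ser múltiplo de 2 o 4
--     base_indent = min(indentations)
--     for indent in indentations:
--         if (indent - base_indent) % 4 != 0 and (indent - base_indent) % 2 != 0:
--             return False
--
--     return True
-- ===== SOURCE B (Python) =====
-- def _check_consistent_indentation(code: str) -> bool:
--     """Consistent indentation <=> all non-blank lines' indents share one parity."""
--     parities = {(len(line) - len(line.lstrip())) % 2
--                 for line in code.split('\n') if line.strip()}
--     return len(parities) <= 1
-- ===== Notes on version B (the rewrite author's own statement) =====
-- stated objective: simpler
-- what changed: B drops A's min-of-indents base and modulus-pair loop and instead collects the set of indentation parities in one comprehension, returning whether that set has at most one element (A's guard fires exactly when an indent's parity differs from the minimum's).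
import Mathlib
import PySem

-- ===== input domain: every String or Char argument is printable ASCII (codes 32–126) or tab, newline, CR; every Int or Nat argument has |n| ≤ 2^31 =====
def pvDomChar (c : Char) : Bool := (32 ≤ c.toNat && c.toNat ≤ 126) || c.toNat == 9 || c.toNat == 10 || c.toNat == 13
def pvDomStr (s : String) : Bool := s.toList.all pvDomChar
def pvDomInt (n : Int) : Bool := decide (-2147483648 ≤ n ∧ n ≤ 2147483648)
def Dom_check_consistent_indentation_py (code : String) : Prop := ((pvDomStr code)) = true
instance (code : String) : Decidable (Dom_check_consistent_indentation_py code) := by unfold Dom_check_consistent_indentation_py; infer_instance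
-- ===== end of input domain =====

-- B replaces A's min-base-plus-modulus double pass by a single parity set: simpler (one set
-- comprehension and a size test instead of min + a second comparison loop).

-- ===== PORT A =====
-- Python's 'if line.strip():' truthiness (non-empty after strip)
def pvKeep (line : List Char) : Bool := decide (PySem.Chars.strip line ≠ [])
-- 'len(line) - len(line.lstrip())'
def pvIndent (line : List Char) : Int :=
  PySem.Chars.len line - PySem.Chars.len (PySem.Chars.lstrip line)
-- the 'for indent in indentations: … return False' loop with its early return
def pvLoopA (base : Int) : List Int → Bool
  | [] => true
  | i :: rest =>
    if PySem.Int.mod (i - base) 4 ≠ 0 ∧ PySem.Int.mod (i - base) 2 ≠ 0 then false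
    else pvLoopA base rest

def check_consistent_indentation_py (code : String) : Bool :=
  let lines := (PySem.Chars.splitOn code.toList ['\n']).filter pvKeep
  if lines = [] then true
  else
    let indentations := lines.foldl
      (fun acc line => if pvKeep line = true then acc ++ [pvIndent line] else acc) []
    if indentations = [] then true
    else
      match PySem.List.min? indentations (fun x => x) with
      | none => true  -- unreachable: indentations ≠ []
      | some base => pvLoopA base indentations

-- ===== PORT B =====
def check_consistent_indentation_py_alt (code : String) : Bool :=
  let parities := PySem.Set.ofList
      (((PySem.Chars.splitOn code.toList ['\n']).filter pvKeep).map
        (fun line => PySem.Int.mod (pvIndent line) 2))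
  decide (PySem.Set.len parities ≤ 1)

-- ===== PRECONDITION & SPEC =====
def Spec_check_consistent_indentation_py (code : String) (out : Bool) : Prop := out = check_consistent_indentation_py_alt code
instance (code : String) (out : Bool) : Decidable (Spec_check_consistent_indentation_py code out) := by unfold Spec_check_consistent_indentation_py; infer_instance

-- ===== CLAIM (what is proved, stated in full; the proofs are below) =====
def Claim_equal_check_consistent_indentation_py : Prop := ∀ (code : String), Dom_check_consistent_indentation_py code → Spec_check_consistent_indentation_py code (check_consistent_indentation_py code)

-- ===== LEMMAS AND PROOFS =====

-- A's guard fires exactly on odd (i - base): an odd number is divisible by neither 4 nor 2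
lemma pvLoopA_eq_all (base : Int) (xs : List Int) :
    pvLoopA base xs = xs.all (fun i => decide (PySem.Int.mod (i - base) 2 = 0)) := by
  induction xs with
  | nil => rfl
  | cons i rest ih =>
    rw [List.all_cons, ← ih]
    show (if PySem.Int.mod (i - base) 4 ≠ 0 ∧ PySem.Int.mod (i - base) 2 ≠ 0 then false
          else pvLoopA base rest) = _
    by_cases h2 : PySem.Int.mod (i - base) 2 = 0
    · rw [if_neg (fun h => h.2 h2), decide_eq_true h2, Bool.true_and]
    · have h4 : PySem.Int.mod (i - base) 4 ≠ 0 := by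
        intro h
        exact h2 ((PySem.Int.mod_eq_zero_iff_dvd _ _).mpr
          (dvd_trans ⟨2, by ring⟩ ((PySem.Int.mod_eq_zero_iff_dvd _ _).mp h)))
      rw [if_pos ⟨h4, h2⟩, decide_eq_false h2, Bool.false_and]

-- a Python set has at most one element iff everything inserted was equal
lemma pvSetLen_le_one_iff (l : List Int) :
    PySem.Set.len (PySem.Set.ofList l) ≤ 1 ↔ ∀ a ∈ l, ∀ b ∈ l, a = b := by
  have hnd := PySem.Set.nodup_ofList l
  constructor
  · intro h a ha b hb
    have ha' := (PySem.Set.mem_ofList l a).mpr ha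
    have hb' := (PySem.Set.mem_ofList l b).mpr hb
    match hl : PySem.Set.ofList l with
    | [] => rw [hl] at ha'; cases ha'
    | [x] => rw [hl] at ha' hb'; simp at ha' hb'; omega
    | x :: y :: r => rw [hl] at h; simp [PySem.Set.len] at h; omega
  · intro h
    match hl : PySem.Set.ofList l with
    | [] => simp [PySem.Set.len]
    | [x] => simp [PySem.Set.len]
    | x :: y :: r =>
      exfalso
      have hx : x ∈ l := (PySem.Set.mem_ofList l x).mp (by rw [hl]; simp)
      have hy : y ∈ l := (PySem.Set.mem_ofList l y).mp (by rw [hl]; simp)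
      rw [hl] at hnd
      exact (List.nodup_cons.mp hnd).1 (by simp [h x hx y hy])

-- same parity as the base ⟺ equal residues mod 2
lemma pvParity_iff (i m : Int) :
    PySem.Int.mod (i - m) 2 = 0 ↔ PySem.Int.mod i 2 = PySem.Int.mod m 2 := by
  rw [PySem.Int.mod_eq_zero_iff_dvd,
      PySem.Int.mod_eq_emod_of_pos (by norm_num : (0:Int) < 2),
      PySem.Int.mod_eq_emod_of_pos (by norm_num : (0:Int) < 2)]
  omega

-- the core equivalence, over the common list of indentations
lemma pvCore (xs : List Int) (m : Int) (hmin : PySem.List.min? xs (fun x => x) = some m) :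
    pvLoopA m xs =
      decide (PySem.Set.len (PySem.Set.ofList
        (xs.map (fun i => PySem.Int.mod i 2))) ≤ 1) := by
  have hm : m ∈ xs := PySem.List.min?_mem hmin
  rw [pvLoopA_eq_all, Bool.eq_iff_iff]
  simp only [List.all_eq_true, decide_eq_true_eq]
  rw [pvSetLen_le_one_iff]
  constructor
  · intro h a ha b hb
    simp only [List.mem_map] at ha hb
    obtain ⟨i, hi, rfl⟩ := ha
    obtain ⟨j, hj, rfl⟩ := hb
    rw [(pvParity_iff i m).mp (h i hi), (pvParity_iff j m).mp (h j hj)]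
  · intro h i hi
    exact (pvParity_iff i m).mpr
      (h _ (List.mem_map_of_mem hi) _ (List.mem_map_of_mem hm))

-- ===== VERDICT (by name: the statement is the Claim_ definition above) =====
theorem check_consistent_indentation_py_spec : Claim_equal_check_consistent_indentation_py := by
  intro code _
  unfold Spec_check_consistent_indentation_py
  unfold check_consistent_indentation_py check_consistent_indentation_py_alt
  simp only []
  have hall : ∀ line ∈ (PySem.Chars.splitOn code.toList ['\n']).filter pvKeep,
      pvKeep line = true := fun _ h => List.of_mem_filter h
  rw [PySem.List.foldl_append_if pvKeep pvIndent
      ((PySem.Chars.splitOn code.toList ['\n']).filter pvKeep) [],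
      List.filter_eq_self.mpr hall, List.nil_append]
  set lines := (PySem.Chars.splitOn code.toList ['\n']).filter pvKeep with hlines
  by_cases hnil : lines = []
  · simp [hnil, PySem.Set.len, PySem.Set.ofList]
  · have hmapnil : lines.map pvIndent ≠ [] := by simp [hnil]
    rw [if_neg hnil, if_neg hmapnil]
    rcases hmin : PySem.List.min? (lines.map pvIndent) (fun x => x) with _ | m
    · exact absurd ((PySem.List.min?_eq_none_iff _ _).mp hmin) hmapnil
    · show pvLoopA m (lines.map pvIndent) = _
      rw [pvCore (lines.map pvIndent) m hmin, List.map_map]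
      rfl
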